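-- pv_equiv track=rewrite | github.com/SoumilB7/UML_agent | Backend/utils/editor.py | _apply_remove_transition
-- ===== SOURCE A (Python) =====
-- def _apply_remove_transition(lines: list, details: dict) -> list:
--     """Remove a transition from a state diagram."""
--     from_state = details.get("from")
--     to_state = details.get("to")
--
--     if not from_state or not to_state:
--         return lines
--
--     for i in range(len(lines) - 1, -1, -1):
--         line = lines[i].strip()
--         if from_state in line and to_state in line and '-->' in line:
--             lines.pop(i)
--             break
--
--     return lines
-- ===== SOURCE B (Python) =====
-- def _apply_remove_transition(lines: list, details: dict) -> list:
--     """Remove a transition from a state diagram.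
--
--     Rebuilds the list back-to-front: folds over reversed(lines) with a
--     'removed' flag, skipping the first match seen (i.e. the last match in
--     forward order), then reverses the kept lines back. Unlike A it does not
--     mutate the caller's list; the returned value is identical.
--     """
--     from_state = details.get("from")
--     to_state = details.get("to")
--
--     if not from_state or not to_state:
--         return lines
--
--     kept = []
--     removed = False
--     for raw in reversed(lines):
--         line = raw.strip()
--         if not removed and from_state in line and to_state in line and '-->' in line:
--             removed = True
--             continue
--         kept.append(raw)
--     kept.reverse()
--     return kept
-- ===== Notes on version B (the rewrite author's own statement) =====
-- stated objective: alternative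
-- what changed: Instead of scanning indices backward and popping in place, B folds over reversed(lines) with a 'removed' flag, rebuilding a fresh list back-to-front that skips the last matching line (return value identical; B does not mutate the caller's list).
import Mathlib
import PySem

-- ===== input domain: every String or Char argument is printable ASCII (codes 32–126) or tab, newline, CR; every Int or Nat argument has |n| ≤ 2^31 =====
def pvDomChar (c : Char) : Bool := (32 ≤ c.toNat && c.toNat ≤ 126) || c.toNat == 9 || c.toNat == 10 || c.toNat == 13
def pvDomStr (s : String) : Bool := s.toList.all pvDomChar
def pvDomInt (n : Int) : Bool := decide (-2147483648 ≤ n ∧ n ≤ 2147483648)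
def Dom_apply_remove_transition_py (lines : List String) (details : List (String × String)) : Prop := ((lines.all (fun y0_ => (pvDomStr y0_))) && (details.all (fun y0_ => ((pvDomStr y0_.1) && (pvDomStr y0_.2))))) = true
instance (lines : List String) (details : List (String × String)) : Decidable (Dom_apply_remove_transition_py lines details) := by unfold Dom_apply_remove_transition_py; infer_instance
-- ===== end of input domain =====

-- B rebuilds the list back-to-front: a fold over reversed(lines) with a 'removed' flag skips the
-- last matching line and the kept lines are reversed back; A instead scans indices backward and
-- pops in place. Return values agree; A mutates the caller's list, B does not (return-value
-- equivalence is what is proved).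

-- ===== PORT A =====
-- backward loop 'for i in range(len(lines)-1, -1, -1)' with break, as recursion over that index list
def pvLoopA (lines : List String) (fs ts : String) : List Int → List String
  | [] => lines
  | i :: rest =>
    let line := PySem.Str.strip (PySem.List.pyGetD lines i "")
    if PySem.Str.isIn fs line && PySem.Str.isIn ts line && PySem.Str.isIn "-->" line then
      match PySem.List.pop? lines i with
      | some r => r.2
      | none => lines
    else pvLoopA lines fs ts rest

def apply_remove_transition_py (lines : List String) (details : List (String × String)) : List String :=
  match PySem.Dict.get? (PySem.Dict.mk details) "from", PySem.Dict.get? (PySem.Dict.mk details) "to" with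
  | some fs, some ts =>
    if fs = "" || ts = "" then lines
    else pvLoopA lines fs ts (PySem.List.pyRange ((lines.length : Int) - 1) (-1) (-1))
  | _, _ => lines

-- ===== PORT B =====
def apply_remove_transition_py_alt (lines : List String) (details : List (String × String)) : List String :=
  match PySem.Dict.get? (PySem.Dict.mk details) "from" with
  | none => lines
  | some fs =>
    match PySem.Dict.get? (PySem.Dict.mk details) "to" with
    | none => lines
    | some ts =>
      if fs = "" || ts = "" then lines
      else
        let res := lines.reverse.foldl (fun (acc : List String × Bool) raw =>
          let line := PySem.Str.strip raw
          if !acc.2 && (PySem.Str.isIn fs line && PySem.Str.isIn ts line && PySem.Str.isIn "-->" line) then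
            (acc.1, true)
          else (acc.1 ++ [raw], acc.2)) ([], false)
        res.1.reverse

-- ===== PRECONDITION & SPEC =====
def Spec_apply_remove_transition_py (lines : List String) (details : List (String × String)) (out : List String) : Prop := out = apply_remove_transition_py_alt lines details
instance (lines : List String) (details : List (String × String)) (out : List String) : Decidable (Spec_apply_remove_transition_py lines details out) := by unfold Spec_apply_remove_transition_py; infer_instance

-- ===== CLAIM (what is proved, stated in full; the proofs are below) =====
def Claim_equal_apply_remove_transition_py : Prop := ∀ (lines : List String) (details : List (String × String)), Dom_apply_remove_transition_py lines details → Spec_apply_remove_transition_py lines details (apply_remove_transition_py lines details)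

-- ===== LEMMAS AND PROOFS =====

-- the line test both programs use
def pvTest (fs ts line : String) : Bool :=
  PySem.Str.isIn fs (PySem.Str.strip line) && PySem.Str.isIn ts (PySem.Str.strip line) &&
  PySem.Str.isIn "-->" (PySem.Str.strip line)

-- remove the first element satisfying the test (= last match in forward order, applied to a reversed list)
def pvRemFirst (fs ts : String) : List String → List String
  | [] => []
  | x :: xs => if pvTest fs ts x then xs else x :: pvRemFirst fs ts xs

-- B's fold step
def pvStep (fs ts : String) (acc : List String × Bool) (raw : String) : List String × Bool :=
  if !acc.2 && (PySem.Str.isIn fs (PySem.Str.strip raw) && PySem.Str.isIn ts (PySem.Str.strip raw) &&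
      PySem.Str.isIn "-->" (PySem.Str.strip raw)) then (acc.1, true)
  else (acc.1 ++ [raw], acc.2)

theorem pvFold_true (fs ts : String) (l : List String) (out : List String) :
    l.foldl (pvStep fs ts) (out, true) = (out ++ l, true) := by
  induction l generalizing out with
  | nil => simp
  | cons x xs ih => simp [pvStep, ih]

theorem pvFold_false (fs ts : String) (l : List String) (out : List String) :
    (l.foldl (pvStep fs ts) (out, false)).1 = out ++ pvRemFirst fs ts l := by
  induction l generalizing out with
  | nil => simp [pvRemFirst]
  | cons x xs ih =>
    by_cases h : pvTest fs ts x
    · have h' : (PySem.Str.isIn fs (PySem.Str.strip x) && PySem.Str.isIn ts (PySem.Str.strip x) &&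
          PySem.Str.isIn "-->" (PySem.Str.strip x)) = true := by simpa [pvTest] using h
      have hs : pvStep fs ts (out, false) x = (out, true) := by
        simp only [pvStep, Bool.not_false, Bool.true_and, h', if_true]
      rw [List.foldl_cons, hs, pvFold_true]
      simp [pvRemFirst, h]
    · have h' : (PySem.Str.isIn fs (PySem.Str.strip x) && PySem.Str.isIn ts (PySem.Str.strip x) &&
          PySem.Str.isIn "-->" (PySem.Str.strip x)) = false := by simpa [pvTest] using h
      have hs : pvStep fs ts (out, false) x = (out ++ [x], false) := by
        simp only [pvStep, Bool.not_false, Bool.true_and, h', Bool.false_eq_true, if_false]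
      rw [List.foldl_cons, hs, ih]
      simp [pvRemFirst, h]

-- A's backward scan over the first k indices = remove-first on the reversed prefix
theorem pvLoopA_eq (fs ts : String) (lines : List String) (k : Nat) (hk : k ≤ lines.length) :
    pvLoopA lines fs ts (PySem.List.pyRange ((k : Int) - 1) (-1) (-1)) =
      (pvRemFirst fs ts ((lines.take k).reverse)).reverse ++ lines.drop k := by
  induction k with
  | zero =>
    rw [PySem.List.pyRange_neg_one_eq_nil (by norm_num)]
    simp [pvRemFirst, pvLoopA]
  | succ k ih =>
    have h1 : ((k + 1 : Nat) : Int) - 1 = (k : Int) := by push_cast; ring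
    have hklt : k < lines.length := by omega
    rw [h1, PySem.List.pyRange_neg_one_cons (by omega : (-1 : Int) < (k : Int))]
    have hget : PySem.List.pyGetD lines ((k : Nat) : Int) "" = lines.getD k "" :=
      PySem.List.pyGetD_natCast lines k ""
    have hgetE : lines.getD k "" = lines[k] := List.getD_eq_getElem lines "" hklt
    have htake : lines.take (k + 1) = lines.take k ++ [lines[k]] := by
      rw [List.take_add_one]
      simp [hklt]
    by_cases h : pvTest fs ts lines[k]
    · have h' := h
      simp only [pvTest] at h'
      simp only [pvLoopA, hget, hgetE, h', if_pos,
        PySem.List.pop?_natCast lines k hklt]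
      rw [List.eraseIdx_eq_take_drop_succ]
      rw [htake, List.reverse_append]
      simp [pvRemFirst, h]
    · have h' : (PySem.Str.isIn fs (PySem.Str.strip lines[k]) && PySem.Str.isIn ts (PySem.Str.strip lines[k]) &&
          PySem.Str.isIn "-->" (PySem.Str.strip lines[k])) = false := by simpa [pvTest] using h
      simp only [pvLoopA, hget, hgetE, h', Bool.false_eq_true, if_false]
      rw [ih (by omega), htake, List.reverse_append,
        List.drop_eq_getElem_cons hklt]
      simp [pvRemFirst, h]

-- ===== VERDICT (by name: the statement is the Claim_ definition above) =====
theorem apply_remove_transition_py_spec : Claim_equal_apply_remove_transition_py := by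
  intro lines details _
  unfold Spec_apply_remove_transition_py apply_remove_transition_py apply_remove_transition_py_alt
  cases hf : PySem.Dict.get? (PySem.Dict.mk details) "from" with
  | none => rfl
  | some fs =>
    cases ht : PySem.Dict.get? (PySem.Dict.mk details) "to" with
    | none => rfl
    | some ts =>
      dsimp only
      by_cases he : fs = "" ∨ ts = ""
      · rcases he with he | he <;> simp [he]
      · push Not at he
        rw [if_neg (by simp [he.1, he.2]), if_neg (by simp [he.1, he.2])]
        rw [pvLoopA_eq fs ts lines lines.length le_rfl]
        have hfold : lines.reverse.foldl (fun (acc : List String × Bool) raw =>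
            let line := PySem.Str.strip raw
            if !acc.2 && (PySem.Str.isIn fs line && PySem.Str.isIn ts line && PySem.Str.isIn "-->" line) then
              (acc.1, true)
            else (acc.1 ++ [raw], acc.2)) ([], false) =
            lines.reverse.foldl (pvStep fs ts) ([], false) := rfl
        rw [hfold]
        have := pvFold_false fs ts lines.reverse []
        simp only [List.nil_append] at this
        rw [this]
        simp
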